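-- pv_equiv track=rewrite | github.com/algoitssm/algoritm_sungryul | Baekjoon/21314_민겸수.py | min_val
-- ===== SOURCE A (Python) =====
-- def min_val(nums):
--     new_nums = ""
--     cnt = 0  # M 개수 세기 위한 변수
--
--     for num in nums:
--         if num == "M":
--             cnt += 1
--         else:
--             if cnt:
--                 new_nums += str(10 ** (cnt - 1))
--             new_nums += "5"
--             cnt = 0
--     # 끝이 M으로 끝나는 경우, 10의 제곱으로 더함
--     if cnt:
--         new_nums += "1" + "0" * (cnt - 1)
--
--     return new_nums
-- ===== SOURCE B (Python) =====
-- def min_val(nums):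
--     # split into runs of 'M' separated by any non-'M' character (A emits '5' for every non-'M')
--     parts = ''.join('M' if c == 'M' else 'K' for c in nums).split('K')
--     res = []
--     for part in parts[:-1]:
--         if part:
--             res.append('1' + '0' * (len(part) - 1))
--         res.append('5')
--     if parts[-1]:
--         res.append('1' + '0' * (len(parts[-1]) - 1))
--     return ''.join(res)
-- ===== Notes on version B (the rewrite author's own statement) =====
-- stated objective: alternative
-- what changed: Replaces A's char-by-char scan with a running M-counter by mapping every non-M character to a separator, splitting the string into M-groups, and emitting '1'+'0'*(len-1) per group plus a '5' per separator.
import Mathlib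
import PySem

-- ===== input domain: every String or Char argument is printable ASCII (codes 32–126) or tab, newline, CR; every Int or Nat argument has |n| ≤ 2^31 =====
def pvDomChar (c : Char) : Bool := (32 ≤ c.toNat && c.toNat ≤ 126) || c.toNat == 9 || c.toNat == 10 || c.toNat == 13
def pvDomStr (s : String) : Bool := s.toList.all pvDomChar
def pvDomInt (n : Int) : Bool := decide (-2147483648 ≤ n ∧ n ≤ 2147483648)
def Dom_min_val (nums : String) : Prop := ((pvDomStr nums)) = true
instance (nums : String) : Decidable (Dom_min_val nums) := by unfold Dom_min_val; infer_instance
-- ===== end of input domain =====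

-- B replaces A's char-by-char M-counter scan by a split-into-groups-then-loop-over-groups decomposition (objective: alternative; equal cost).


-- ===== PORT A =====
-- one iteration of A's for-loop; state = (new_nums, cnt); str(10 ** (cnt-1)) is PySem.Int.toChars
def aStep (p : List Char × Nat) (num : Char) : List Char × Nat :=
  if num = 'M' then (p.1, p.2 + 1)
  else (p.1 ++ (if p.2 ≠ 0 then PySem.Int.toChars ((10 : Int) ^ (p.2 - 1)) else []) ++ ['5'], 0)

def min_val (nums : String) : String :=
  let st := nums.toList.foldl aStep ([], 0)
  String.mk (if st.2 ≠ 0 then st.1 ++ '1' :: List.replicate (st.2 - 1) '0' else st.1)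

-- ===== PORT B =====
-- '1' + '0' * (len(part) - 1) if part else ''
def bPiece (part : List Char) : List Char :=
  if part ≠ [] then '1' :: List.replicate (part.length - 1) '0' else []

-- .split('K') is List.splitOnP (· == 'K'); parts[:-1] is dropLast, parts[-1] is getLastD
-- (exact: split of a string always yields a nonempty list of parts)
def min_val_alt (nums : String) : String :=
  let parts := (nums.toList.map (fun c => if c = 'M' then 'M' else 'K')).splitOnP (· == 'K')
  String.mk (parts.dropLast.foldl (fun res part => res ++ bPiece part ++ ['5']) []
             ++ bPiece (parts.getLastD []))

-- ===== PRECONDITION & SPEC =====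
def Spec_min_val (nums : String) (out : String) : Prop := out = min_val_alt nums
instance (nums : String) (out : String) : Decidable (Spec_min_val nums out) := by unfold Spec_min_val; infer_instance

-- ===== CLAIM (what is proved, stated in full; the proofs are below) =====
def Claim_equal_min_val : Prop := ∀ (nums : String), Dom_min_val nums → Spec_min_val nums (min_val nums)

-- ===== LEMMAS AND PROOFS =====

-- what A's loop emits for a run of cnt consecutive 'M's
def pvEmit (cnt : Nat) : List Char := if cnt ≠ 0 then '1' :: List.replicate (cnt - 1) '0' else []

-- common recursive characterisation of both programs' output, scanning with a pending M-count
def pvProc : List Char → Nat → List Char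
  | [], cnt => pvEmit cnt
  | c :: l, cnt => if c = 'M' then pvProc l (cnt + 1) else pvEmit cnt ++ '5' :: pvProc l 0

-- B's group-by-group output, structurally on the list of parts
def pvG : List (List Char) → List Char
  | [] => []
  | [p] => pvEmit p.length
  | p :: q :: rest => pvEmit p.length ++ '5' :: pvG (q :: rest)

lemma pv_toDigitsCore_pow (k : Nat) : ∀ (f : Nat) (l : List Char), k < f →
    Nat.toDigitsCore 10 f (10 ^ k) l = '1' :: (List.replicate k '0' ++ l) := by
  induction k with
  | zero =>
    intro f l hf
    cases f with
    | zero => omega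
    | succ f =>
      have hd1 : Nat.digitChar 1 = '1' := by decide
      simp [Nat.toDigitsCore, hd1]
  | succ k ih =>
    intro f l hf
    cases f with
    | zero => omega
    | succ f =>
      have h1 : 10 ^ (k + 1) / 10 = 10 ^ k := by
        rw [pow_succ]; exact Nat.mul_div_cancel _ (by norm_num)
      have h2 : 10 ^ (k + 1) % 10 = 0 := by
        rw [pow_succ]; exact Nat.mul_mod_left _ _
      have h3 : ¬ (10 ^ (k + 1) / 10 = 0) := by
        rw [h1]; positivity
      rw [Nat.toDigitsCore, if_neg h3, h1, h2]
      rw [ih f _ (by omega)]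
      have hd0 : Nat.digitChar 0 = '0' := by decide
      simp [hd0, List.replicate_succ']

lemma pv_toChars_pow (n : Nat) :
    PySem.Int.toChars ((10 : Int) ^ n) = '1' :: List.replicate n '0' := by
  have hpos : (0 : Int) ≤ (10 : Int) ^ n := by positivity
  have hcast : ((10 : Int) ^ n) = ((10 ^ n : Nat) : Int) := by push_cast; ring
  rw [PySem.Int.toChars, if_neg (by omega), hcast, Int.toNat_natCast]
  rw [Nat.toDigits]
  have hlt : n < 10 ^ n := Nat.lt_pow_self (by norm_num)
  rw [pv_toDigitsCore_pow n (10 ^ n + 1) [] (by omega)]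
  simp

lemma pv_aStep_eq (p : List Char × Nat) (c : Char) :
    aStep p c = if c = 'M' then (p.1, p.2 + 1) else (p.1 ++ pvEmit p.2 ++ ['5'], 0) := by
  unfold aStep pvEmit
  by_cases hc : c = 'M'
  · simp [hc]
  · by_cases h2 : p.2 ≠ 0 <;> simp [hc, h2, pv_toChars_pow]

lemma pv_main : ∀ (l : List Char) (acc : List Char) (cnt : Nat),
    (fun st : List Char × Nat =>
      if st.2 ≠ 0 then st.1 ++ '1' :: List.replicate (st.2 - 1) '0' else st.1)
      (l.foldl aStep (acc, cnt)) = acc ++ pvProc l cnt := by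
  intro l
  induction l with
  | nil =>
    intro acc cnt
    simp only [List.foldl_nil, pvProc, pvEmit]
    split_ifs <;> simp
  | cons c l ih =>
    intro acc cnt
    rw [List.foldl_cons, pv_aStep_eq]
    by_cases hc : c = 'M' <;> simp [hc, pvProc, ih, List.append_assoc]

lemma pv_split : ∀ (l : List Char) (k : Nat),
    pvG (((l.map (fun c => if c = 'M' then 'M' else 'K')).splitOnP (· == 'K')).modifyHead
      (List.replicate k 'M' ++ ·)) = pvProc l k := by
  intro l
  induction l with
  | nil =>
    intro k
    simp [pvG, pvProc, pvEmit]
  | cons c l ih =>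
    intro k
    by_cases hc : c = 'M'
    · rw [List.map_cons, if_pos hc, List.splitOnP_cons]
      have : (('M' : Char) == 'K') = false := by decide
      rw [this]
      simp only [Bool.false_eq_true, if_false, List.modifyHead_modifyHead]
      have hfun : ((List.replicate k 'M' ++ ·) ∘ (List.cons 'M')) =
          (List.replicate (k + 1) 'M' ++ ·) := by
        funext x; simp [List.replicate_succ']
      rw [hfun, ih (k + 1)]
      simp [pvProc, hc]
    · rw [List.map_cons, if_neg hc, List.splitOnP_cons]
      have : (('K' : Char) == 'K') = true := by decide
      rw [this]
      simp only [if_true, List.modifyHead]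
      have hne := List.splitOnP_ne_nil (fun c => c == 'K')
        (l.map (fun c => if c = 'M' then 'M' else 'K'))
      rcases hq : (l.map (fun c => if c = 'M' then 'M' else 'K')).splitOnP (· == 'K') with
        _ | ⟨q, rest⟩
      · exact absurd hq hne
      · have hid := ih 0
        rw [hq] at hid
        simp only [List.replicate_zero, List.nil_append] at hid ⊢
        have : (q :: rest).modifyHead (fun x => x) = q :: rest := by
          simp [List.modifyHead]
        rw [this] at hid
        simp [pvG, pvProc, hc, hid, List.length_replicate]

lemma pv_bPiece (p : List Char) : bPiece p = pvEmit p.length := by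
  unfold bPiece pvEmit
  by_cases hp : p = [] <;> simp [hp]

lemma pv_foldg : ∀ (parts : List (List Char)) (acc : List Char), parts ≠ [] →
    parts.dropLast.foldl (fun res part => res ++ bPiece part ++ ['5']) acc
      ++ bPiece (parts.getLastD []) = acc ++ pvG parts := by
  intro parts
  induction parts with
  | nil => intro acc h; exact absurd rfl h
  | cons p tail ih =>
    intro acc _
    cases tail with
    | nil => simp [pvG, pv_bPiece]
    | cons q rest =>
      have hdl : (p :: q :: rest).dropLast = p :: (q :: rest).dropLast := by
        simp [List.dropLast]
      rw [hdl, List.foldl_cons]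
      have hgl : (p :: q :: rest).getLastD [] = (q :: rest).getLastD [] := by
        simp
      rw [hgl, ih (acc ++ bPiece p ++ ['5']) (by simp)]
      simp [pvG, pv_bPiece, List.append_assoc]

-- ===== VERDICT (by name: the statement is the Claim_ definition above) =====
theorem min_val_spec : Claim_equal_min_val := by
  unfold Claim_equal_min_val
  intro nums _
  show min_val nums = min_val_alt nums
  have hA := pv_main nums.toList [] 0
  simp only at hA
  have hne := List.splitOnP_ne_nil (fun c => c == 'K')
    (nums.toList.map (fun c => if c = 'M' then 'M' else 'K'))
  have hB := pv_foldg ((nums.toList.map (fun c => if c = 'M' then 'M' else 'K')).splitOnP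
    (· == 'K')) [] hne
  have hS := pv_split nums.toList 0
  simp only [List.replicate_zero, List.nil_append] at hS
  rw [show (fun x : List Char => x) = (id : List Char → List Char) from rfl] at hS
  rw [List.modifyHead_id] at hS
  simp only [id_eq] at hS
  simp only [min_val, min_val_alt]
  rw [hA, hB, hS]
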